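-- pv_equiv track=rewrite | github.com/hrkim28/TCT | 20190228/TCT_20190228_SeEunHong.py | getRisK
-- ===== SOURCE A (Python) =====
-- def getRisK(memory, userList) :
--     totalRisk = 0
--
--     for inx in range(len(userList)):
--         num = inx - memory
--         if inx < memory : num = 0
--         memoryList = userList[num:inx]
--         if userList[inx] in memoryList : totalRisk=totalRisk+1
--         else : totalRisk=totalRisk+5
--
--
--     return totalRisk
-- ===== SOURCE B (Python) =====
-- def getRisK(memory, userList):
--     k = memory if memory > 0 else 0
--     counts = {}
--     total = 0
--     for i, x in enumerate(userList):
--         total += 1 if counts.get(x, 0) > 0 else 5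
--         counts[x] = counts.get(x, 0) + 1
--         if i - k >= 0:
--             y = userList[i - k]
--             counts[y] = counts.get(y, 0) - 1
--     return total
-- ===== Notes on version B (the rewrite author's own statement) =====
-- stated objective: faster
-- what changed: Replaces A's per-index window slice and linear 'in' scan by a single pass that maintains a sliding-window count dictionary with incremental add/remove, so each element is classified in O(1).
import Mathlib
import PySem

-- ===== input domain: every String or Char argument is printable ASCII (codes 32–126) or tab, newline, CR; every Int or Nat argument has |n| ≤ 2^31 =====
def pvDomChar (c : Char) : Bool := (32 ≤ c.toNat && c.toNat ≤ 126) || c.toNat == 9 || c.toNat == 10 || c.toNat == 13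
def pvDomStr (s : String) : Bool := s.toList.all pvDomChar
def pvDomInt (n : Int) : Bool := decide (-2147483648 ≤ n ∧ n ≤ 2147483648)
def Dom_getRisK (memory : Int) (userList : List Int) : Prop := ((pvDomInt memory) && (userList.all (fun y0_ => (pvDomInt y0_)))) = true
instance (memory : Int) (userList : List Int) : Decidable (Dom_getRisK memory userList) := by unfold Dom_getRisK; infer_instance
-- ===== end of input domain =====

-- ===== PORT A =====
-- B replaces A's per-index slice + linear membership scan by a sliding-window count dictionary (objective: faster, O(n) vs O(n·memory)).
def getRisK (memory : Int) (userList : List Int) : Int :=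
  (PySem.List.pyRange 0 (userList.length : Int) 1).foldl (fun totalRisk inx =>
    let num0 := inx - memory
    let num := if inx < memory then 0 else num0
    let memoryList := PySem.List.slice userList (some num) (some inx)
    if PySem.List.pyGetD userList inx 0 ∈ memoryList then totalRisk + 1 else totalRisk + 5) 0

-- ===== PORT B =====
def getRisK_alt (memory : Int) (userList : List Int) : Int :=
  let k : Int := if memory > 0 then memory else 0
  ((PySem.List.enumerate userList 0).foldl (fun (st : PySem.Dict Int Int × Int) p =>
    let total := st.2 + (if st.1.getD p.2 0 > 0 then 1 else 5)
    let counts := st.1.insert p.2 (st.1.getD p.2 0 + 1)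
    let counts := if p.1 - k ≥ 0 then
        counts.insert (PySem.List.pyGetD userList (p.1 - k) 0)
          (counts.getD (PySem.List.pyGetD userList (p.1 - k) 0) 0 - 1)
      else counts
    (counts, total)) (PySem.Dict.empty, 0)).2


-- ===== PRECONDITION & SPEC =====
def Spec_getRisK (memory : Int) (userList : List Int) (out : Int) : Prop := out = getRisK_alt memory userList
instance (memory : Int) (userList : List Int) (out : Int) : Decidable (Spec_getRisK memory userList out) := by unfold Spec_getRisK; infer_instance

-- ===== CLAIM (what is proved, stated in full; the proofs are below) =====
def Claim_equal_getRisK : Prop := ∀ (memory : Int) (userList : List Int), Dom_getRisK memory userList → Spec_getRisK memory userList (getRisK memory userList)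

-- ===== LEMMAS AND PROOFS =====
-- the window of at most K elements preceding index i
def pvWin (K : Nat) (xs : List Int) (i : Nat) : List Int := (xs.take i).drop (i - K)

-- the risk contribution of index i
def pvCost (K : Nat) (xs : List Int) (i : Nat) : Int :=
  if PySem.List.pyGetD xs (i : Int) 0 ∈ pvWin K xs i then 1 else 5

lemma pvWin_zero (K : Nat) (xs : List Int) : pvWin K xs 0 = [] := by
  simp [pvWin]

lemma pvWin_grow (K : Nat) (xs : List Int) (i : Nat) (hi : i < xs.length) (h : i < K) :
    pvWin K xs (i + 1) = pvWin K xs i ++ [xs[i]] := by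
  unfold pvWin
  have h1 : i + 1 - K = 0 := by omega
  have h2 : i - K = 0 := by omega
  rw [h1, h2, List.drop_zero, List.drop_zero, List.take_add_one, List.getElem?_eq_getElem hi]
  rfl

lemma pvWin_shift (K : Nat) (xs : List Int) (i : Nat) (hi : i < xs.length) (h : K ≤ i)
    (hik : i - K < xs.length) :
    pvWin K xs i ++ [xs[i]] = xs[i - K]'hik :: pvWin K xs (i + 1) := by
  have hlen : (xs.take i).length = i := by rw [List.length_take]; omega
  have hd := List.drop_append_of_le_length (l₁ := xs.take i) (l₂ := [xs[i]]) (i := i - K)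
    (by rw [hlen]; omega)
  unfold pvWin
  rw [← hd]
  have htake : xs.take i ++ [xs[i]] = xs.take (i + 1) := by
    rw [List.take_add_one, List.getElem?_eq_getElem hi]
    rfl
  rw [htake]
  have hlt : i - K < (xs.take (i + 1)).length := by rw [List.length_take]; omega
  rw [List.drop_eq_getElem_cons hlt]
  congr 1
  · exact List.getElem_take
  · congr 1
    omega

lemma slice_eq_pvWin (memory : Int) (xs : List Int) (j : Nat) :
    PySem.List.slice xs (some (if (j : Int) < memory then 0 else (j : Int) - memory)) (some (j : Int))
      = pvWin (if memory > 0 then memory else 0).toNat xs j := by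
  by_cases hm : memory > 0
  · by_cases hj : (j : Int) < memory
    · rw [if_pos hj, PySem.List.slice_zero_start, PySem.List.slice_to xs (by positivity)]
      unfold pvWin
      rw [if_pos hm]
      have h1 : j - memory.toNat = 0 := by omega
      have h2 : ((j : Int)).toNat = j := by omega
      rw [h1, h2, List.drop_zero]
    · rw [if_neg hj]
      rw [PySem.List.slice_toNat xs (show (0 : Int) ≤ (j : Int) - memory by omega) (by positivity)]
      unfold pvWin
      rw [if_pos hm, List.drop_take]
      have e1 : ((j : Int) - memory).toNat = j - memory.toNat := by omega
      have e2 : ((j : Int)).toNat = j := by omega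
      rw [e1, e2]
  · rw [if_neg (show ¬((j : Int) < memory) by omega)]
    rw [PySem.List.slice_toNat xs (show (0 : Int) ≤ (j : Int) - memory by omega) (by positivity)]
    unfold pvWin
    rw [if_neg hm]
    have h1 : ((j : Int)).toNat - ((j : Int) - memory).toNat = 0 := by omega
    rw [h1, List.take_zero]
    refine ((List.drop_eq_nil_iff).2 ?_).symm
    rw [List.length_take]
    omega

lemma getRisK_eq_foldl (memory : Int) (userList : List Int) :
    getRisK memory userList
      = (List.range userList.length).foldl
          (fun acc j => acc + pvCost (if memory > 0 then memory else 0).toNat userList j) 0 := by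
  unfold getRisK
  rw [PySem.List.pyRange_one]
  have hn : ((userList.length : Int) - 0).toNat = userList.length := by omega
  rw [hn, List.foldl_map]
  apply PySem.List.foldl_congr_mem
  intro acc j _
  dsimp only
  simp only [zero_add]
  rw [slice_eq_pvWin memory userList j]
  unfold pvCost
  split_ifs <;> rfl

-- the sliding-window loop invariant: the dict holds the element counts of the current window
lemma getRisK_alt_loop (k : Int) (hk : 0 ≤ k) (userList : List Int) :
    ∀ (ys : List Int) (i : Nat) (st : PySem.Dict Int Int × Int),
      userList.drop i = ys →
      (∀ z : Int, st.1.getD z 0 = ((pvWin k.toNat userList i).count z : Int)) →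
      ((PySem.List.enumerate ys (i : Int)).foldl (fun (st : PySem.Dict Int Int × Int) p =>
          let total := st.2 + (if st.1.getD p.2 0 > 0 then 1 else 5)
          let counts := st.1.insert p.2 (st.1.getD p.2 0 + 1)
          let counts := if p.1 - k ≥ 0 then
              counts.insert (PySem.List.pyGetD userList (p.1 - k) 0)
                (counts.getD (PySem.List.pyGetD userList (p.1 - k) 0) 0 - 1)
            else counts
          (counts, total)) st).2
        = st.2 + ((List.range' i ys.length).map (pvCost k.toNat userList)).sum := by
  intro ys
  induction ys with
  | nil => intro i st _ _; simp [PySem.List.enumerate_nil]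
  | cons x ys ih =>
    intro i st hdrop hinv
    have hi : i < userList.length := by
      by_contra h
      rw [List.drop_eq_nil_of_le (by omega)] at hdrop
      exact (List.cons_ne_nil x ys) hdrop.symm
    have hcons : userList.drop i = userList[i] :: userList.drop (i + 1) :=
      List.drop_eq_getElem_cons hi
    rw [hcons] at hdrop
    have hx : x = userList[i] := ((List.cons.injEq _ _ _ _).mp hdrop).1.symm
    have hys : userList.drop (i + 1) = ys := ((List.cons.injEq _ _ _ _).mp hdrop).2
    have hpy : PySem.List.pyGetD userList (i : Int) 0 = x := by
      rw [PySem.List.pyGetD_natCast, List.getD_eq_getElem userList 0 hi, hx]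
    have hins : ∀ w : Int, (st.1.insert x (st.1.getD x 0 + 1)).getD w 0
        = ((pvWin k.toNat userList i ++ [x]).count w : Int) := by
      intro w
      rw [PySem.Dict.getD_insert, List.count_append]
      by_cases hwx : w = x
      · subst hwx
        rw [if_pos rfl, hinv w]
        have h1 : List.count w [w] = 1 := by simp
        rw [h1]
        push_cast
        ring
      · rw [if_neg hwx, hinv w]
        have h0 : List.count w [x] = 0 := List.count_eq_zero.mpr (by simp [hwx])
        rw [h0]
        push_cast
        ring
    have hmemcost : (if st.1.getD x 0 > 0 then (1 : Int) else 5)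
        = pvCost k.toNat userList i := by
      unfold pvCost
      rw [hpy, hinv x]
      by_cases hmem : x ∈ pvWin k.toNat userList i
      · rw [if_pos hmem, if_pos (by exact_mod_cast List.count_pos_iff.2 hmem)]
      · rw [List.count_eq_zero.mpr hmem, if_neg hmem, if_neg (by simp)]
    have hinv1 : ∀ z : Int,
        ((if (i : Int) - k ≥ 0 then
            (st.1.insert x (st.1.getD x 0 + 1)).insert
              (PySem.List.pyGetD userList ((i : Int) - k) 0)
              ((st.1.insert x (st.1.getD x 0 + 1)).getD
                (PySem.List.pyGetD userList ((i : Int) - k) 0) 0 - 1)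
          else st.1.insert x (st.1.getD x 0 + 1))).getD z 0
          = ((pvWin k.toNat userList (i + 1)).count z : Int) := by
      intro z
      by_cases hKi : (i : Int) - k ≥ 0
      · have hKle : k.toNat ≤ i := by omega
        have hik : i - k.toNat < userList.length := by omega
        have hidx : PySem.List.pyGetD userList ((i : Int) - k) 0 = userList[i - k.toNat]'hik := by
          have h5 : (i : Int) - k = ((i - k.toNat : Nat) : Int) := by omega
          rw [h5, PySem.List.pyGetD_natCast, List.getD_eq_getElem userList 0 hik]
        have hshift := pvWin_shift k.toNat userList i hi hKle hik
        rw [← hx] at hshift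
        rw [if_pos hKi, hidx, PySem.Dict.getD_insert, hins z, hshift, List.count_cons]
        by_cases hzy : z = userList[i - k.toNat]'hik
        · subst hzy
          rw [if_pos rfl, hins _, hshift, List.count_cons, if_pos (by simp)]
          push_cast
          ring
        · rw [if_neg hzy, if_neg (by simp only [beq_iff_eq]; exact fun h => hzy h.symm)]
          push_cast
          ring
      · have hgrow := pvWin_grow k.toNat userList i hi (by omega)
        rw [← hx] at hgrow
        rw [if_neg hKi, hins z, hgrow]
    have hc : (i : Int) + 1 = ((i + 1 : Nat) : Int) := by push_cast; ring
    rw [PySem.List.enumerate_cons, List.foldl_cons, hc,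
      ih (i + 1) _ hys (by intro z; dsimp only; exact hinv1 z)]
    dsimp only
    simp only [List.length_cons]
    rw [List.range'_succ, List.map_cons, List.sum_cons, hmemcost]
    ring

-- ===== VERDICT (by name: the statement is the Claim_ definition above) =====
theorem getRisK_spec : Claim_equal_getRisK := by
  intro memory userList _
  unfold Spec_getRisK
  have hk : (0 : Int) ≤ if memory > 0 then memory else 0 := by split_ifs <;> omega
  have hB := getRisK_alt_loop (if memory > 0 then memory else 0) hk userList userList 0
    (PySem.Dict.empty, 0) (by simp)
    (by intro z; rw [pvWin_zero]; simp [PySem.Dict.getD_empty])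
  simp only [Nat.cast_zero] at hB
  rw [getRisK_eq_foldl, PySem.List.foldl_add, List.range_eq_range']
  simp only [getRisK_alt]
  rw [hB]
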